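-- pv_equiv track=rewrite | github.com/Ashwani1330/python9 | 12/two.py | str_chk
-- ===== SOURCE A (Python) =====
-- def str_chk(str1):
--     l = str1.split(' ')
--     spaces = len(l) - 1
--     lower = 0
--     upper = 0
--     for i in l:
--         for j in i:
--             if j.isupper() == True:
--                 upper += 1
--             elif j.islower() == True:
--                 lower += 1
--     tup = (upper, lower, spaces)
--     return tup
-- ===== SOURCE B (Python) =====
-- def str_chk(str1):
--     upper = 0
--     lower = 0
--     spaces = 0
--     for j in str1:
--         if j.isupper():
--             upper += 1
--         elif j.islower():
--             lower += 1
--         elif j == ' ':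
--             spaces += 1
--     return (upper, lower, spaces)
-- ===== Notes on version B (the rewrite author's own statement) =====
-- stated objective: simpler
-- what changed: B makes a single pass over the string counting uppercase, lowercase and space characters directly, instead of splitting the string at spaces into a list, deriving the space count from the list length minus one and counting letters with a nested loop over the parts.
import Mathlib
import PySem

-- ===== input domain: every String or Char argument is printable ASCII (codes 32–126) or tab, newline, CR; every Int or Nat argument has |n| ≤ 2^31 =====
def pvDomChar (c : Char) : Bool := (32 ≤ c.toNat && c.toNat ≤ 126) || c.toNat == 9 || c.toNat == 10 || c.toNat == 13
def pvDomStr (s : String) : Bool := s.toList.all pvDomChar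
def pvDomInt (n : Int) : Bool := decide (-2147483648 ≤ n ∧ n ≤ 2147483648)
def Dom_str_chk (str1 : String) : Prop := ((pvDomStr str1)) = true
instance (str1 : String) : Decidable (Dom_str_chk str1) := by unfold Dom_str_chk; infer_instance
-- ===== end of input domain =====

-- B replaces A's split-on-space + nested counting loop by a single pass over the
-- string that counts uppercase, lowercase and space characters directly (objective: simpler).


-- ===== PORT A =====
-- l = str1.split(' '); spaces = len(l) - 1; nested loop over the parts counting upper/lower
def str_chk (str1 : String) : Int × Int × Int :=
  let l := PySem.Chars.splitOn str1.toList [' ']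
  let spaces : Int := (l.length : Int) - 1
  let ul : Int × Int := l.foldl (fun st i =>
      i.foldl (fun st j =>
        if PySem.Chars.isupper j then (st.1 + 1, st.2)
        else if PySem.Chars.islower j then (st.1, st.2 + 1)
        else st) st) (0, 0)
  (ul.1, ul.2, spaces)

-- ===== PORT B =====
-- one pass over str1: upper += isupper, elif lower += islower, elif space += (j == ' ')
def str_chk_alt (str1 : String) : Int × Int × Int :=
  str1.toList.foldl (fun st j =>
    if PySem.Chars.isupper j then (st.1 + 1, st.2.1, st.2.2)
    else if PySem.Chars.islower j then (st.1, st.2.1 + 1, st.2.2)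
    else if j == ' ' then (st.1, st.2.1, st.2.2 + 1)
    else st) (0, 0, 0)

-- ===== PRECONDITION & SPEC =====
def Spec_str_chk (str1 : String) (out : Int × Int × Int) : Prop := out = str_chk_alt str1
instance (str1 : String) (out : Int × Int × Int) : Decidable (Spec_str_chk str1 out) := by unfold Spec_str_chk; infer_instance

-- ===== CLAIM (what is proved, stated in full; the proofs are below) =====
def Claim_equal_str_chk : Prop := ∀ (str1 : String), Dom_str_chk str1 → Spec_str_chk str1 (str_chk str1)

-- ===== LEMMAS AND PROOFS =====

theorem modifyHead_fun_id {α : Type} (L : List α) :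
    L.modifyHead (fun x => x) = L := by cases L <;> simp

theorem go_space (fuel : Nat) : ∀ (l cur : List Char) (acc : List (List Char)),
    l.length ≤ fuel →
    PySem.Chars.splitOn.go [' '] fuel l cur acc
      = acc.reverse ++ (l.splitOnP (· == ' ')).modifyHead (fun x => cur.reverse ++ x) := by
  induction fuel with
  | zero =>
    intro l cur acc h
    have hl : l = [] := List.length_eq_zero_iff.mp (Nat.le_zero.mp h)
    subst hl
    simp [PySem.Chars.splitOn.go, List.splitOnP_nil]
  | succ fuel ih =>
    intro l cur acc h
    cases l with
    | nil => simp [PySem.Chars.splitOn.go, List.splitOnP_nil]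
    | cons c rest =>
      rw [PySem.Chars.splitOn.go]
      by_cases hc : c = ' '
      · subst hc
        have hp : List.isPrefixOf [' '] (' ' :: rest) = true := by
          simp [List.isPrefixOf]
        rw [if_pos hp]
        rw [ih _ _ _ (by simpa using Nat.le_of_succ_le_succ h)]
        simp [List.splitOnP_cons, modifyHead_fun_id]
      · have hp : List.isPrefixOf [' '] (c :: rest) = false := by
          simp [List.isPrefixOf]; exact fun h' => hc h'.symm
        rw [if_neg (by simp [hp])]
        rw [ih _ _ _ (by simpa using Nat.le_of_succ_le_succ h)]
        rw [List.splitOnP_cons, if_neg (by simp [hc])]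
        obtain ⟨a, t, ht⟩ := List.exists_cons_of_ne_nil (List.splitOnP_ne_nil (· == ' ') rest)
        rw [ht]
        simp

theorem splitOn_space (cs : List Char) :
    PySem.Chars.splitOn cs [' '] = cs.splitOnP (· == ' ') := by
  unfold PySem.Chars.splitOn
  rw [go_space _ _ _ _ (by omega)]
  simp [modifyHead_fun_id]

theorem length_splitOnP (p : Char → Bool) (cs : List Char) :
    (cs.splitOnP p).length = cs.countP p + 1 := by
  induction cs with
  | nil => simp [List.splitOnP_nil]
  | cons c rest ih =>
    rw [List.splitOnP_cons, List.countP_cons]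
    split_ifs with h <;> simp [ih]

theorem flatten_splitOnP (p : Char → Bool) (cs : List Char) :
    (cs.splitOnP p).flatten = cs.filter (fun c => !p c) := by
  induction cs with
  | nil => simp [List.splitOnP_nil]
  | cons c rest ih =>
    rw [List.splitOnP_cons]
    split_ifs with h
    · simp [h, ih]
    · obtain ⟨a, t, ht⟩ := List.exists_cons_of_ne_nil (List.splitOnP_ne_nil p rest)
      rw [ht]; rw [ht] at ih
      simp_all

theorem pairfold (cs : List Char) : ∀ u l : Int,
    cs.foldl (fun st j =>
        if PySem.Chars.isupper j then (st.1 + 1, st.2)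
        else if PySem.Chars.islower j then (st.1, st.2 + 1)
        else st) (u, l)
      = (u + cs.countP PySem.Chars.isupper,
         l + cs.countP (fun c => !PySem.Chars.isupper c && PySem.Chars.islower c)) := by
  induction cs with
  | nil => intro u l; simp
  | cons c rest ih =>
    intro u l
    simp only [List.foldl_cons, List.countP_cons]
    split_ifs <;> rw [ih] <;> simp_all [Prod.ext_iff] <;> omega

theorem triplefold (cs : List Char) : ∀ u l s : Int,
    cs.foldl (fun st j =>
        if PySem.Chars.isupper j then (st.1 + 1, st.2.1, st.2.2)
        else if PySem.Chars.islower j then (st.1, st.2.1 + 1, st.2.2)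
        else if j == ' ' then (st.1, st.2.1, st.2.2 + 1)
        else st) (u, l, s)
      = (u + cs.countP PySem.Chars.isupper,
         l + cs.countP (fun c => !PySem.Chars.isupper c && PySem.Chars.islower c),
         s + cs.countP (fun c => !PySem.Chars.isupper c && (!PySem.Chars.islower c && (c == ' ')))) := by
  induction cs with
  | nil => intro u l s; simp
  | cons c rest ih =>
    intro u l s
    simp only [List.foldl_cons, List.countP_cons]
    split_ifs <;> rw [ih] <;> simp_all [Prod.ext_iff] <;> omega

theorem upper_pt (c : Char) :
    (PySem.Chars.isupper c && !(c == ' ')) = PySem.Chars.isupper c := by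
  by_cases h : c = ' '
  · subst h; decide
  · simp [h]

theorem lower_pt (c : Char) :
    ((!PySem.Chars.isupper c && PySem.Chars.islower c) && !(c == ' '))
      = (!PySem.Chars.isupper c && PySem.Chars.islower c) := by
  by_cases h : c = ' '
  · subst h; decide
  · simp [h]

theorem space_pt (c : Char) :
    (!PySem.Chars.isupper c && (!PySem.Chars.islower c && (c == ' '))) = (c == ' ') := by
  by_cases h : c = ' '
  · subst h; decide
  · have hb : (c == ' ') = false := by simpa using h
    simp [hb]


-- ===== VERDICT (by name: the statement is the Claim_ definition above) =====
theorem str_chk_spec : Claim_equal_str_chk := by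
  intro str1 _
  unfold Spec_str_chk str_chk str_chk_alt
  dsimp only
  set cs := str1.toList with hcs
  rw [splitOn_space, triplefold]
  rw [show ((cs.splitOnP (· == ' ')).foldl (fun st i =>
        i.foldl (fun st j =>
          if PySem.Chars.isupper j then (st.1 + 1, st.2)
          else if PySem.Chars.islower j then (st.1, st.2 + 1)
          else st) st) ((0 : Int), (0 : Int)))
      = ((cs.splitOnP (· == ' ')).flatten.foldl (fun st j =>
          if PySem.Chars.isupper j then (st.1 + 1, st.2)
          else if PySem.Chars.islower j then (st.1, st.2 + 1)
          else st) ((0 : Int), (0 : Int))) from (List.foldl_flatten).symm]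
  rw [flatten_splitOnP, pairfold, length_splitOnP]
  have hu : (cs.filter (fun c => !(c == ' '))).countP PySem.Chars.isupper
      = cs.countP PySem.Chars.isupper := by
    rw [List.countP_filter]
    exact List.countP_congr (fun x _ => by rw [upper_pt])
  have hl : (cs.filter (fun c => !(c == ' '))).countP
        (fun c => !PySem.Chars.isupper c && PySem.Chars.islower c)
      = cs.countP (fun c => !PySem.Chars.isupper c && PySem.Chars.islower c) := by
    rw [List.countP_filter]
    exact List.countP_congr (fun x _ => by rw [lower_pt])
  have hs : cs.countP (fun c => !PySem.Chars.isupper c && (!PySem.Chars.islower c && (c == ' ')))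
      = cs.countP (fun c => (c == ' ')) := by
    exact List.countP_congr (fun x _ => by rw [space_pt])
  simp only [hu, hl, hs, Prod.ext_iff]
  push_cast
  exact ⟨trivial, trivial, by omega⟩
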